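-- pv_equiv track=rewrite | github.com/hmcts/acr-transfer | scripts/acr_transfer_lib.py | _normalize_ignore_patterns
-- ===== SOURCE A (Python) =====
-- from typing import Callable, List, Optional, Sequence
--
-- def _normalize_ignore_patterns(raw_patterns: Optional[Sequence[str]]) -> List[str]:
--     if not raw_patterns:
--         return []
--     patterns: List[str] = []
--     for entry in raw_patterns:
--         if entry is None:
--             continue
--         if not isinstance(entry, str):
--             raise ValueError("Ignore pattern values must be strings.")
--         cleaned = entry.strip()
--         if not cleaned:
--             continue
--         for token in cleaned.split(","):
--             candidate = token.strip()
--             if candidate: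
--                 patterns.append(candidate)
--     return patterns
-- ===== SOURCE B (Python) =====
-- from typing import List, Optional, Sequence
--
--
-- def _normalize_ignore_patterns(raw_patterns: Optional[Sequence[str]]) -> List[str]:
--     if not raw_patterns:
--         return []
--     patterns: List[str] = []
--     for entry in raw_patterns:
--         if entry is None:
--             continue
--         if not isinstance(entry, str):
--             raise ValueError("Ignore pattern values must be strings.")
--         # single character-level scan: accumulate chars, flush a stripped
--         # token at each comma and once at the end
--         cur: List[str] = []
--         for ch in entry.strip():
--             if ch == ",":
--                 token = "".join(cur).strip()
--                 if token:
--                     patterns.append(token)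
--                 cur = []
--             else:
--                 cur.append(ch)
--         token = "".join(cur).strip()
--         if token:
--             patterns.append(token)
--     return patterns
-- ===== Notes on version B (the rewrite author's own statement) =====
-- stated objective: alternative
-- what changed: Replaces the per-entry strip/split(',')/strip-token pipeline (library split producing an intermediate token list, then a nested loop over it) with a single character-level scan per entry that flushes a stripped token at each comma and at the end, with no intermediate token list and no empty-cleaned guard.
import Mathlib
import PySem

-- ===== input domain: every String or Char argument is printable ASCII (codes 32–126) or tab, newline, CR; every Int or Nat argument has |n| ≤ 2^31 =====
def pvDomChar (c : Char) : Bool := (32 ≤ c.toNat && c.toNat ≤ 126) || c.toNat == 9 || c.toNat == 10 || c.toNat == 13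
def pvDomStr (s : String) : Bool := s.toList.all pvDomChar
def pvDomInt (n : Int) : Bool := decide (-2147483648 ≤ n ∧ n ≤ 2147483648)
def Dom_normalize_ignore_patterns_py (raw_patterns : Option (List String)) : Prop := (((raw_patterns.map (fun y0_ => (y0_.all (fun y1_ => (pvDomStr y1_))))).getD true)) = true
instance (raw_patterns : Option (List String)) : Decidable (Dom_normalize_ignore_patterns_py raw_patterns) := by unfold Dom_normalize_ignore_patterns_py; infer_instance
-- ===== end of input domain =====

-- B replaces A's per-entry strip/split(",")/strip-token nested loops by a single
-- character-level scan per entry (flush a stripped token at each comma and at the end);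
-- same cost, different decomposition ("alternative").

-- ===== PORT A =====
def normalize_ignore_patterns_py (raw_patterns : Option (List String)) : List String :=
  match raw_patterns with
  | none => []                                   -- `if not raw_patterns: return []`
  | some xs =>
    if xs = [] then []
    else
      xs.foldl (fun patterns entry =>
        let cleaned := PySem.Str.strip entry
        if cleaned = "" then patterns             -- `if not cleaned: continue`
        else
          ((PySem.Str.split? cleaned ",").getD []).foldl
            (fun patterns token =>
              let candidate := PySem.Str.strip token
              if candidate = "" then patterns
              else patterns ++ [candidate])
            patterns) []

-- ===== PORT B =====
-- flush: `token = "".join(cur).strip(); if token: patterns.append(token)`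
def pvFlushB (cur : List Char) (patterns : List String) : List String :=
  let token := PySem.Str.strip (String.ofList cur)
  if token = "" then patterns else patterns ++ [token]

def normalize_ignore_patterns_py_alt (raw_patterns : Option (List String)) : List String :=
  match raw_patterns with
  | none => []                                   -- `if not raw_patterns: return []`
  | some xs =>
    if xs = [] then []
    else
      xs.foldl (fun patterns entry =>
        let st := (PySem.Str.strip entry).toList.foldl
          (fun (st : List Char × List String) ch =>
            if ch = ',' then ([], pvFlushB st.1 st.2)
            else (st.1 ++ [ch], st.2))
          ([], patterns)
        pvFlushB st.1 st.2) []

-- ===== PRECONDITION & SPEC =====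
def Spec_normalize_ignore_patterns_py (raw_patterns : Option (List String)) (out : List String) : Prop := out = normalize_ignore_patterns_py_alt raw_patterns
instance (raw_patterns : Option (List String)) (out : List String) : Decidable (Spec_normalize_ignore_patterns_py raw_patterns out) := by unfold Spec_normalize_ignore_patterns_py; infer_instance

-- ===== CLAIM (what is proved, stated in full; the proofs are below) =====
def Claim_equal_normalize_ignore_patterns_py : Prop := ∀ (raw_patterns : Option (List String)), Dom_normalize_ignore_patterns_py raw_patterns → Spec_normalize_ignore_patterns_py raw_patterns (normalize_ignore_patterns_py raw_patterns)

-- ===== LEMMAS AND PROOFS =====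

-- simple structural single-char comma splitter: pvSplitC pre s = the pieces of pre++s
def pvSplitC : List Char → List Char → List (List Char)
  | pre, [] => [pre]
  | pre, c :: rest => if c = ',' then pre :: pvSplitC [] rest else pvSplitC (pre ++ [c]) rest

-- the stripped token a raw piece contributes, if nonempty
def pvTok? (t : List Char) : Option String :=
  if PySem.Chars.strip t = [] then none else some (String.ofList (PySem.Chars.strip t))

theorem pvOfList_eq_empty_iff (l : List Char) : (String.ofList l = "") ↔ l = [] := by
  constructor
  · intro h; have := congrArg String.toList h; simpa using this
  · intro h; subst h; rfl

theorem pvFlushB_eq (cur : List Char) (patterns : List String) :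
    pvFlushB cur patterns = patterns ++ ([cur].filterMap pvTok?) := by
  simp only [pvFlushB, pvTok?, PySem.Str.strip, String.toList_ofList, List.filterMap]
  by_cases h : PySem.Chars.strip cur = []
  · simp [h]
  · simp [h, (pvOfList_eq_empty_iff _).not.mpr h]

theorem pvSplitOn_go_eq (fuel : Nat) :
    ∀ (l cur : List Char) (out : List (List Char)), l.length < fuel →
      PySem.Chars.splitOn.go [','] fuel l cur out.reverse = out ++ pvSplitC cur.reverse l := by
  induction fuel with
  | zero => intro l cur out h; omega
  | succ n ih =>
    intro l cur out h
    cases l with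
    | nil => simp [PySem.Chars.splitOn.go, pvSplitC]
    | cons c rest =>
      simp only [PySem.Chars.splitOn.go, pvSplitC]
      by_cases hc : c = ','
      · subst hc
        simp only [List.isPrefixOf]
        have h1 : (rest.length : Nat) < n := by simpa using h
        have := ih rest [] (out ++ [cur.reverse]) h1
        simpa [List.reverse_append, if_pos] using this
      · have hc' : ¬ ((',' : Char) = c) := fun hh => hc hh.symm
        have h1 : (rest.length : Nat) < n := by simpa using h
        have := ih rest (c :: cur) out h1
        simpa [hc, hc'] using this

theorem pvSplitOn_eq (s : List Char) :
    PySem.Chars.splitOn s [','] = pvSplitC [] s := by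
  have := pvSplitOn_go_eq (s.length + 1) s [] [] (by omega)
  simpa [PySem.Chars.splitOn] using this

-- B's per-entry scan produces exactly the stripped nonempty tokens of the pieces
theorem pvScan_eq (s : List Char) :
    ∀ (cur : List Char) (patterns : List String),
      (let st := s.foldl
          (fun (st : List Char × List String) ch =>
            if ch = ',' then ([], pvFlushB st.1 st.2)
            else (st.1 ++ [ch], st.2))
          (cur, patterns)
       pvFlushB st.1 st.2) = patterns ++ (pvSplitC cur s).filterMap pvTok? := by
  induction s with
  | nil => intro cur patterns; simpa [pvSplitC] using pvFlushB_eq cur patterns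
  | cons c rest ih =>
    intro cur patterns
    by_cases hc : c = ','
    · subst hc
      simp only [List.foldl_cons, pvSplitC, if_true]
      rw [ih [] (pvFlushB cur patterns), pvFlushB_eq]
      simp [List.filterMap_cons]
      cases pvTok? cur <;> simp
    · simp only [List.foldl_cons, if_neg hc, pvSplitC]
      rw [ih (cur ++ [c]) patterns]

-- A's inner token loop over the pieces produces the same tokens
theorem pvInner_eq (ts : List (List Char)) :
    ∀ (patterns : List String),
      (ts.map String.ofList).foldl
        (fun patterns token =>
          let candidate := PySem.Str.strip token
          if candidate = "" then patterns else patterns ++ [candidate])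
        patterns = patterns ++ ts.filterMap pvTok? := by
  induction ts with
  | nil => intro patterns; simp
  | cons t rest ih =>
    intro patterns
    simp only [List.map_cons, List.foldl_cons, List.filterMap_cons]
    have hstrip : PySem.Str.strip (String.ofList t) = String.ofList (PySem.Chars.strip t) := by
      simp [PySem.Str.strip]
    by_cases h : PySem.Chars.strip t = []
    · rw [ih]; simp [hstrip, h, pvTok?]
    · rw [ih]
      simp [hstrip, pvTok?, h, (pvOfList_eq_empty_iff _).not.mpr h]

-- the two per-entry steps agree
theorem pvStep_eq (entry : String) (patterns : List String) :
    (let cleaned := PySem.Str.strip entry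
     if cleaned = "" then patterns
     else
       ((PySem.Str.split? cleaned ",").getD []).foldl
         (fun patterns token =>
           let candidate := PySem.Str.strip token
           if candidate = "" then patterns
           else patterns ++ [candidate])
         patterns) =
    (let st := (PySem.Str.strip entry).toList.foldl
        (fun (st : List Char × List String) ch =>
          if ch = ',' then ([], pvFlushB st.1 st.2)
          else (st.1 ++ [ch], st.2))
        ([], patterns)
     pvFlushB st.1 st.2) := by
  rw [pvScan_eq]
  by_cases h : PySem.Str.strip entry = ""
  · have ht : (PySem.Str.strip entry).toList = [] := by rw [h]; rfl
    simp [h, pvSplitC, pvTok?, PySem.Chars.strip, PySem.Chars.lstrip, PySem.Chars.rstrip]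
  · have hsplit : PySem.Str.split? (PySem.Str.strip entry) "," =
        some ((pvSplitC [] (PySem.Str.strip entry).toList).map String.ofList) := by
      simp [PySem.Str.split?, PySem.Chars.split?, pvSplitOn_eq]
    simp only [h, hsplit, Option.getD_some]
    simp [pvInner_eq]

-- ===== VERDICT (by name: the statement is the Claim_ definition above) =====
theorem normalize_ignore_patterns_py_spec : Claim_equal_normalize_ignore_patterns_py := by
  intro raw_patterns _
  unfold Spec_normalize_ignore_patterns_py normalize_ignore_patterns_py normalize_ignore_patterns_py_alt
  cases raw_patterns with
  | none => rfl
  | some xs =>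
    by_cases hxs : xs = []
    · simp [hxs]
    · simp only [if_neg hxs]
      have hf : (fun (patterns : List String) (entry : String) =>
          let cleaned := PySem.Str.strip entry
          if cleaned = "" then patterns
          else
            ((PySem.Str.split? cleaned ",").getD []).foldl
              (fun patterns token =>
                let candidate := PySem.Str.strip token
                if candidate = "" then patterns
                else patterns ++ [candidate])
              patterns) =
          (fun (patterns : List String) (entry : String) =>
            let st := (PySem.Str.strip entry).toList.foldl
              (fun (st : List Char × List String) ch =>
                if ch = ',' then ([], pvFlushB st.1 st.2)
                else (st.1 ++ [ch], st.2))
              ([], patterns)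
            pvFlushB st.1 st.2) := by
        funext patterns entry
        exact pvStep_eq entry patterns
      exact congrArg (fun f => xs.foldl f ([] : List String)) hf
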